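-- pv_equiv track=rewrite | github.com/slovb/advent_of_code_2019 | 17/first.py | parse
-- ===== SOURCE A (Python) =====
-- def parse(data):
--     scaffold = {}
--     x = 0
--     y = 0
--     for d in data:
--         if d == ord('.'):
--             x += 1
--         elif d == ord("\n"):
--             x = 0
--             y += 1
--         else:
--             scaffold[(x, y)] = d
--             x += 1
--     return scaffold
-- ===== SOURCE B (Python) =====
-- def parse(data):
--     # group the int stream into rows by splitting on ord('\n'),
--     # then a nested indexed traversal fills the dict
--     rows = []
--     row = []
--     for d in data:
--         if d == ord('\n'):
--             rows.append(row)
--             row = []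
--         else:
--             row.append(d)
--     rows.append(row)
--     scaffold = {}
--     for y, r in enumerate(rows):
--         for x, c in enumerate(r):
--             if c != ord('.'):
--                 scaffold[(x, y)] = c
--     return scaffold
-- ===== Notes on version B (the rewrite author's own statement) =====
-- stated objective: alternative
-- what changed: Replaces A's single flat loop with manual x/y counter bookkeeping and a three-way branch by a two-phase algorithm: first split the int stream into per-row lists on ord('\n'), then a nested enumerate traversal stores every non-'.' cell.
import Mathlib
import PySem

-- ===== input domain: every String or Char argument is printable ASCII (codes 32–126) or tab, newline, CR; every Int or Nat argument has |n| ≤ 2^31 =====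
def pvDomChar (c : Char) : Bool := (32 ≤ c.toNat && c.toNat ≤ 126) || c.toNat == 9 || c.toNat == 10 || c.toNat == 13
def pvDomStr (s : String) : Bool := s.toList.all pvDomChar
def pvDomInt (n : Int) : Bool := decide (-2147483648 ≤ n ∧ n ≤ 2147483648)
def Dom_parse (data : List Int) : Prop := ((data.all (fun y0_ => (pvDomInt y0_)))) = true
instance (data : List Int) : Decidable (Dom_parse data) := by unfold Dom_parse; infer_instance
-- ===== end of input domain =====

-- B replaces A's flat loop with manual x/y counters by a split-into-rows phase plus a
-- nested enumerate traversal (alternative decomposition, same cost).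
-- The dict is ported as an append-only list: the scan position (x,y) strictly advances,
-- so each key is inserted at most once and insertion-order append is exact.

-- ===== PORT A =====
def parse (data : List Int) : List (Int × Int × Int) :=
  let st := data.foldl
    (fun (st : List (Int × Int × Int) × Int × Int) d =>
      let sc := st.1; let x := st.2.1; let y := st.2.2
      if d = 46 then (sc, x + 1, y)
      else if d = 10 then (sc, 0, y + 1)
      else (sc ++ [(x, y, d)], x + 1, y))
    ([], 0, 0)
  st.1

-- ===== PORT B =====
def parse_alt (data : List Int) : List (Int × Int × Int) :=
  let p := data.foldl
    (fun (st : List (List Int) × List Int) d =>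
      if d = 10 then (st.1 ++ [st.2], []) else (st.1, st.2 ++ [d]))
    ([], [])
  let rows := p.1 ++ [p.2]
  (PySem.List.enumerate rows 0).foldl
    (fun acc (yr : Int × List Int) =>
      (PySem.List.enumerate yr.2 0).foldl
        (fun acc (xc : Int × Int) =>
          if xc.2 ≠ 46 then acc ++ [(xc.1, yr.1, xc.2)] else acc)
        acc)
    []

-- ===== PRECONDITION & SPEC =====
def Spec_parse (data : List Int) (out : List (Int × Int × Int)) : Prop := out = parse_alt data
instance (data : List Int) (out : List (Int × Int × Int)) : Decidable (Spec_parse data out) := by unfold Spec_parse; infer_instance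

-- ===== CLAIM (what is proved, stated in full; the proofs are below) =====
def Claim_equal_parse : Prop := ∀ (data : List Int), Dom_parse data → Spec_parse data (parse data)

-- ===== LEMMAS AND PROOFS =====

/-- The items contributed by one row `r`, with x starting at `x`, at line `y`. -/
def rowItems (x y : Int) : List Int → List (Int × Int × Int)
  | [] => []
  | c :: t => (if c ≠ 46 then [(x, y, c)] else []) ++ rowItems (x + 1) y t

/-- The items contributed by the rows, the first one at line `y`. -/
def allItems (y : Int) : List (List Int) → List (Int × Int × Int)
  | [] => []
  | r :: rs => rowItems 0 y r ++ allItems (y + 1) rs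

/-- Split on 10: (first row, remaining rows). -/
def splitR : List Int → List Int × List (List Int)
  | [] => ([], [])
  | d :: t =>
    let p := splitR t
    if d = 10 then ([], p.1 :: p.2) else (d :: p.1, p.2)

theorem parse_foldl_eq (data : List Int) : ∀ (x y : Int) (acc : List (Int × Int × Int)),
    (data.foldl
      (fun (st : List (Int × Int × Int) × Int × Int) d =>
        let sc := st.1; let x := st.2.1; let y := st.2.2
        if d = 46 then (sc, x + 1, y)
        else if d = 10 then (sc, 0, y + 1)
        else (sc ++ [(x, y, d)], x + 1, y))
      (acc, x, y)).1
      = acc ++ rowItems x y (splitR data).1 ++ allItems (y + 1) (splitR data).2 := by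
  induction data with
  | nil => intro x y acc; simp [rowItems, allItems, splitR]
  | cons d t ih =>
    intro x y acc
    by_cases h46 : d = 46
    · subst h46
      simp only [List.foldl_cons, if_pos rfl, splitR, reduceIte, ih]
      simp [rowItems]
    · by_cases h10 : d = 10
      · subst h10
        simp only [List.foldl_cons, splitR, reduceIte, if_neg (by decide : (10:Int) ≠ 46), ih]
        simp [rowItems, allItems]
      · simp only [List.foldl_cons, if_neg h46, if_neg h10, splitR, ih]
        simp [rowItems, allItems, splitR, h46, h10]

theorem split_foldl_eq (data : List Int) : ∀ (rows : List (List Int)) (row : List Int),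
    (let p := data.foldl
        (fun (st : List (List Int) × List Int) d =>
          if d = 10 then (st.1 ++ [st.2], []) else (st.1, st.2 ++ [d]))
        (rows, row)
     p.1 ++ [p.2])
    = rows ++ ((row ++ (splitR data).1) :: (splitR data).2) := by
  induction data with
  | nil => intro rows row; simp [splitR]
  | cons d t ih =>
    intro rows row
    by_cases h10 : d = 10
    · subst h10
      simp only [List.foldl_cons, reduceIte, splitR]
      rw [ih]
      simp
    · simp only [List.foldl_cons, if_neg h10, splitR, reduceIte]
      rw [ih]
      simp [h10]

theorem inner_foldl_eq (r : List Int) : ∀ (s y : Int) (acc : List (Int × Int × Int)),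
    (PySem.List.enumerate r s).foldl
      (fun acc (xc : Int × Int) =>
        if xc.2 ≠ 46 then acc ++ [(xc.1, y, xc.2)] else acc)
      acc = acc ++ rowItems s y r := by
  induction r with
  | nil => intro s y acc; simp [rowItems, PySem.List.enumerate_nil]
  | cons c t ih =>
    intro s y acc
    rw [PySem.List.enumerate_cons]
    simp only [List.foldl_cons, ih, rowItems]
    by_cases h : c ≠ 46 <;> simp [h]

theorem outer_foldl_eq (rows : List (List Int)) : ∀ (y : Int) (acc : List (Int × Int × Int)),
    (PySem.List.enumerate rows y).foldl
      (fun acc (yr : Int × List Int) =>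
        (PySem.List.enumerate yr.2 0).foldl
          (fun acc (xc : Int × Int) =>
            if xc.2 ≠ 46 then acc ++ [(xc.1, yr.1, xc.2)] else acc)
          acc)
      acc = acc ++ allItems y rows := by
  induction rows with
  | nil => intro y acc; simp [allItems, PySem.List.enumerate_nil]
  | cons r rs ih =>
    intro y acc
    rw [PySem.List.enumerate_cons, List.foldl_cons, inner_foldl_eq, ih]
    simp [allItems]

theorem parse_eq_closed (data : List Int) :
    parse data = rowItems 0 0 (splitR data).1 ++ allItems 1 (splitR data).2 := by
  have h := parse_foldl_eq data 0 0 []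
  simpa [parse] using h

theorem parse_alt_eq_closed (data : List Int) :
    parse_alt data = rowItems 0 0 (splitR data).1 ++ allItems 1 (splitR data).2 := by
  unfold parse_alt
  have h := split_foldl_eq data [] []
  simp only at h
  have hrows :
      (let p := data.foldl
          (fun (st : List (List Int) × List Int) d =>
            if d = 10 then (st.1 ++ [st.2], []) else (st.1, st.2 ++ [d]))
          ([], [])
       p.1 ++ [p.2]) = (splitR data).1 :: (splitR data).2 := by
    rw [h]; simp
  simp only at hrows ⊢
  rw [hrows, outer_foldl_eq]
  simp [allItems]

-- ===== VERDICT (by name: the statement is the Claim_ definition above) =====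
theorem parse_spec : Claim_equal_parse := by
  intro data _
  unfold Spec_parse
  rw [parse_eq_closed, parse_alt_eq_closed]
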